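-- pv_equiv track=rewrite | github.com/sanathkumarbs/coding-challenges | recursion/pairstar.py | pairstar
-- ===== SOURCE A (Python) =====
-- def pairstar(input, index=0, output=None):
--     if index == len(input):
--         return output
--     else:
--         if output:
--             if output[-1] == input[index]:
--                 output += "*"
--
--             output += input[index]
--         else:
--             output = input[index]
--
--         index += 1
--         return pairstar(input, index, output)
-- ===== SOURCE B (Python) =====
-- def pairstar(input, index=0, output=None):
--     n = len(input)
--     while index < n:
--         ch = input[index]
--         index += 1
--         if not output:
--             output = ch
--             continue
--         if output[-1] == ch:
--             output += '*' + ch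
--         else:
--             output += ch
--     return output
-- ===== Notes on version B (the rewrite author's own statement) =====
-- stated objective: simpler
-- what changed: Replaced the index-threading tail recursion by a flat iterative while-loop in guard style (empty-accumulator case handled by an early continue, the '*' appended together with the character), removing recursion and its call depth entirely.
import Mathlib
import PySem

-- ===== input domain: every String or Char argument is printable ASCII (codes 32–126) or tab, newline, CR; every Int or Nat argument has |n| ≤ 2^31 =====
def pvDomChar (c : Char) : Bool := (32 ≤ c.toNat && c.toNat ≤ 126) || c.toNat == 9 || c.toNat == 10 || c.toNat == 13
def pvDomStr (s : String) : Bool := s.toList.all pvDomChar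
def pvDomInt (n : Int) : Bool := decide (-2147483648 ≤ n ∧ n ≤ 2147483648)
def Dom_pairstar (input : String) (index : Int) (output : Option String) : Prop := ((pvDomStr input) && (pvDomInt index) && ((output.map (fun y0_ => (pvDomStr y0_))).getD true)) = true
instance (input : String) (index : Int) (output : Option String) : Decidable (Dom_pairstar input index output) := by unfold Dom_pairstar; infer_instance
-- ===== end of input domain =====

-- B replaces A's index-threading tail recursion by a flat guard-style while-loop; return value only, no mutation.

-- ===== PORT A =====
-- Literal port of A's recursion; `fuel` is only a totality guard (inside Pre_ the
-- recursion performs at most 2*len steps, so fuel is never exhausted there).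
def pairstarGo (xs : List Char) (index : Int) (output : Option (List Char)) (fuel : Nat) : Option (List Char) :=
  match fuel with
  | 0 => none
  | fuel + 1 =>
    if index = (xs.length : Int) then output
    else
      match PySem.List.pyGet? xs index with   -- input[index]; none = IndexError (outside Pre_)
      | none => none
      | some c =>
        let output' : List Char :=
          match output with
          | some s =>
            if s ≠ [] then                     -- `if output:` truthiness
              (if PySem.List.pyGet? s (-1) = some c then s ++ ['*'] else s) ++ [c]
            else [c]
          | none => [c]
        pairstarGo xs (index + 1) (some output') fuel

def pairstar (input : String) (index : Int) (output : Option String) : Option String :=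
  (pairstarGo input.toList index (output.map String.toList) (2 * input.toList.length + 1)).map String.ofList

-- ===== PORT B =====
-- B's while-loop: terminates because (n - index) shrinks each iteration.
def pairstarLoop (xs : List Char) (index : Int) (output : Option (List Char)) : Option (List Char) :=
  if h : index < (xs.length : Int) then
    match PySem.List.pyGet? xs index with     -- input[index]; none = IndexError (outside Pre_)
    | none => none
    | some ch =>
      pairstarLoop xs (index + 1)
        (some (match output with               -- `if not output: output = ch; continue`
          | none => [ch]
          | some s =>
            if s = [] then [ch]
            else if PySem.List.pyGet? s (-1) = some ch then s ++ ['*', ch]   -- output += '*' + ch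
            else s ++ [ch]))
  else output
termination_by ((xs.length : Int) - index).toNat
decreasing_by omega

def pairstar_alt (input : String) (index : Int) (output : Option String) : Option String :=
  (pairstarLoop input.toList index (output.map String.toList)).map String.ofList

-- ===== PRECONDITION & SPEC =====
-- Pre_ excludes exactly the inputs where A raises IndexError: index outside [-len, len].
def Pre_pairstar (input : String) (index : Int) (output : Option String) : Prop :=
  -(input.toList.length : Int) ≤ index ∧ index ≤ (input.toList.length : Int)
instance (input : String) (index : Int) (output : Option String) : Decidable (Pre_pairstar input index output) := by unfold Pre_pairstar; infer_instance
def pvWitness_pairstar : String × Int × Option String := ("aab", 0, none)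

def Spec_pairstar (input : String) (index : Int) (output : Option String) (out : Option String) : Prop := out = pairstar_alt input index output
instance (input : String) (index : Int) (output : Option String) (out : Option String) : Decidable (Spec_pairstar input index output out) := by unfold Spec_pairstar; infer_instance

-- ===== CLAIM (what is proved, stated in full; the proofs are below) =====
def Claim_equal_pairstar : Prop := ∀ (input : String) (index : Int) (output : Option String), Dom_pairstar input index output → Pre_pairstar input index output → Spec_pairstar input index output (pairstar input index output)

-- ===== LEMMAS AND PROOFS =====

theorem pvGo_eq_loop (fuel : Nat) (xs : List Char) (i : Int) (out : Option (List Char))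
    (hle : i ≤ (xs.length : Int)) (hf : (xs.length : Int) - i < (fuel : Int)) :
    pairstarGo xs i out fuel = pairstarLoop xs i out := by
  induction fuel generalizing i out with
  | zero => omega
  | succ f ih =>
    by_cases hstop : i = (xs.length : Int)
    · rw [pairstarGo, if_pos hstop, pairstarLoop, dif_neg (by omega)]
    · have hlt : i < (xs.length : Int) := lt_of_le_of_ne hle hstop
      rw [pairstarGo, if_neg hstop, pairstarLoop, dif_pos hlt]
      cases hget : PySem.List.pyGet? xs i with
      | none => rfl
      | some c =>
        dsimp only
        rw [ih (i + 1) _ (by omega) (by omega)]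
        congr 2
        cases out with
        | none => rfl
        | some s =>
          by_cases hs : s = []
          · subst hs; rfl
          · by_cases hlast : PySem.List.pyGet? s (-1) = some c <;>
              simp [hs, hlast]

-- ===== VERDICT (by name: the statement is the Claim_ definition above) =====
theorem pairstar_spec : Claim_equal_pairstar := by
  intro input index output hDom hPre
  obtain ⟨h1, h2⟩ := hPre
  unfold Spec_pairstar pairstar pairstar_alt
  rw [pvGo_eq_loop (2 * input.toList.length + 1) input.toList index _ h2 (by push_cast; omega)]
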